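-- pv_equiv track=rewrite | github.com/sakharamg/Chaotic_Programmers | Lab5/Chaotic_Programmers/q1.py | nList
-- ===== SOURCE A (Python) =====
-- def nList(L,N):                           # taking List and number of splits from main
--     # write ypur code here.
--  import itertools
--  #storing length of list in end
--  list1=[]
--  end=len(L)
--  temp=[]
--  for j in range(N):
--     #in islice, j is the index from where to start and N is the no. of jumps/steps to be taken
--     #islice will run till end of list and store jth value in new1 taking jumps of N
--     temp=list(itertools.islice(L,j,end,N))
--     list1.append(temp)
--
--  return(list1)
-- ===== SOURCE B (Python) =====
-- def nList(L, N):
--     if N <= 0: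
--         return []
--     buckets = [[] for _ in range(N)]
--     for i, x in enumerate(L):
--         buckets[i % N].append(x)
--     return buckets
-- ===== Notes on version B (the rewrite author's own statement) =====
-- stated objective: faster
-- what changed: Replaces A's N separate strided islice scans of L with one round-robin pass over enumerate(L) that appends each element to bucket i % N.
import Mathlib
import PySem

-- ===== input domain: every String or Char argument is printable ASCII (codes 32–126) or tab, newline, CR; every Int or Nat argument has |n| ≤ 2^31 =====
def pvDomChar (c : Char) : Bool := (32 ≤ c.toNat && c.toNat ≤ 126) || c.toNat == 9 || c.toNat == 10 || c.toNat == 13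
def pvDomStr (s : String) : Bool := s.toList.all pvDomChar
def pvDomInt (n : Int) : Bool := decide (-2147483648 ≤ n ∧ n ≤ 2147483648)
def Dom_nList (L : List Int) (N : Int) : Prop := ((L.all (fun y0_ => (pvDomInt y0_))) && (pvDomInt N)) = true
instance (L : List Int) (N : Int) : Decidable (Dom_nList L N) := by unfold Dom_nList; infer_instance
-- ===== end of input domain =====

-- B replaces A's N separate strided islice scans of L by a single round-robin pass
-- over enumerate(L) appending each element to bucket i % N (objective: faster).


-- ===== PORT A =====
-- itertools.islice(L, j, end, N) with 0 ≤ j, end = len(L) and (inside the loop) N ≥ 1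
-- is exactly the extended slice L[j:end:N]; slice? is some there (step N ≠ 0), so .getD [] is never taken.
def nList (L : List Int) (N : Int) : List (List Int) :=
  let list1 : List (List Int) := []
  let end_ : Int := PySem.List.len L
  (PySem.List.pyRange 0 N 1).foldl
    (fun list1 j =>
      let temp := (PySem.List.slice? L (some j) (some end_) N).getD []
      list1 ++ [temp])
    list1

-- ===== PORT B =====
def nList_alt (L : List Int) (N : Int) : List (List Int) :=
  if N ≤ 0 then []
  else
    (PySem.List.enumerate L 0).foldl
      (fun buckets p => buckets.modify (PySem.Int.mod p.1 N).toNat (fun b => b ++ [p.2]))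
      (List.replicate N.toNat [])

-- ===== PRECONDITION & SPEC =====
def Spec_nList (L : List Int) (N : Int) (out : List (List Int)) : Prop := out = nList_alt L N
instance (L : List Int) (N : Int) (out : List (List Int)) : Decidable (Spec_nList L N out) := by unfold Spec_nList; infer_instance

-- ===== CLAIM (what is proved, stated in full; the proofs are below) =====
def Claim_equal_nList : Prop := ∀ (L : List Int) (N : Int), Dom_nList L N → Spec_nList L N (nList L N)

-- ===== LEMMAS AND PROOFS =====

-- elements of L (scanned from offset s) landing in bucket j, i.e. those at absolute position p with (s+p) % n = j
def spread (n : Nat) : List Int → Nat → Nat → List Int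
  | [], _, _ => []
  | x :: xs, s, j => if s % n = j then x :: spread n xs (s + 1) j else spread n xs (s + 1) j

theorem add_mod_ne (s k n : Nat) (h1 : 0 < k) (h2 : k < n) : (s + k) % n ≠ s % n := by
  intro h
  have h' : s + k ≡ s + 0 [MOD n] := by simpa [Nat.ModEq] using h
  have hk : k ≡ 0 [MOD n] := Nat.ModEq.add_left_cancel' s h'
  have hk0 : k % n = 0 := by simpa [Nat.ModEq] using hk
  rw [Nat.mod_eq_of_lt h2] at hk0
  omega

-- A's strided index scan equals `spread`
theorem filterMap_stride_eq_spread (n : Nat) (hn : 0 < n) :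
    ∀ (L : List Int) (s t c j : Nat), t < n → (s + t) % n = j → L.length ≤ t + n * c →
      (List.range c).filterMap (fun k => L[t + n * k]?) = spread n L s j := by
  intro L
  induction L with
  | nil =>
      intro s t c j _ _ _
      simp [spread]
  | cons x xs ih =>
      intro s t c j ht hj hlen
      cases t with
      | zero =>
          have hsj : s % n = j := by simpa using hj
          cases c with
          | zero => simp at hlen
          | succ c' =>
              have hms : n * (c' + 1) = n * c' + n := by ring
              rw [List.range_succ_eq_map]
              simp only [List.filterMap_cons, List.filterMap_map]
              have hx : (x :: xs)[0 + n * 0]? = some x := by simp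
              rw [hx]
              have hstep : ∀ k ∈ List.range c',
                  ((fun k => (x :: xs)[0 + n * k]?) ∘ (fun k => k + 1)) k
                    = (fun k => xs[(n - 1) + n * k]?) k := by
                intro k _
                show (x :: xs)[0 + n * (k + 1)]? = xs[(n - 1) + n * k]?
                have hmk : n * (k + 1) = n * k + n := by ring
                have e : 0 + n * (k + 1) = ((n - 1) + n * k) + 1 := by omega
                rw [e, List.getElem?_cons_succ]
              rw [List.filterMap_congr hstep]
              rw [ih (s + 1) (n - 1) c' j (by omega)
                (by rw [show s + 1 + (n - 1) = s + n by omega, Nat.add_mod_right]; exact hsj)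
                (by simp at hlen; omega)]
              simp [spread, hsj]
      | succ t' =>
          have hne : s % n ≠ j := by
            intro h
            exact add_mod_ne s (t' + 1) n (by omega) ht (hj.trans h.symm)
          have hstep : ∀ k ∈ List.range c, (x :: xs)[t' + 1 + n * k]? = xs[t' + n * k]? := by
            intro k _
            have e : t' + 1 + n * k = (t' + n * k) + 1 := by omega
            rw [e, List.getElem?_cons_succ]
          rw [List.filterMap_congr hstep]
          rw [ih (s + 1) t' c j (by omega)
            (by rw [show s + 1 + t' = s + (t' + 1) by omega]; exact hj)
            (by simp at hlen; omega)]
          simp [spread, hne]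

theorem self_eq_map_getD (bs : List (List Int)) :
    (List.range bs.length).map (fun j => bs.getD j []) = bs := by
  apply List.ext_getElem
  · simp
  · intro i h1 h2
    simp [List.getD_eq_getElem?_getD, List.getElem?_eq_getElem h2]

-- the round-robin fold distributes xs (enumerated from s) over the buckets
theorem distrib_inv (N : Int) (hN : 0 < N) :
    ∀ (xs : List Int) (s : Nat) (bs : List (List Int)), bs.length = N.toNat →
      (PySem.List.enumerate xs (s : Int)).foldl
        (fun buckets p => buckets.modify (PySem.Int.mod p.1 N).toNat (fun b => b ++ [p.2])) bs
      = (List.range N.toNat).map (fun j => bs.getD j [] ++ spread N.toNat xs s j) := by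
  intro xs
  induction xs with
  | nil =>
      intro s bs hbs
      rw [PySem.List.enumerate_nil]
      simp only [List.foldl_nil, spread, List.append_nil]
      rw [← hbs, self_eq_map_getD]
  | cons x xs ih =>
      intro s bs hbs
      rw [PySem.List.enumerate_cons]
      simp only [List.foldl_cons]
      have hmod : (PySem.Int.mod (s : Int) N).toNat = s % N.toNat := by
        have hNn : ((N.toNat : Nat) : Int) = N := Int.toNat_of_nonneg (by omega)
        calc (PySem.Int.mod (s : Int) N).toNat
            = (PySem.Int.mod ((s : Nat) : Int) ((N.toNat : Nat) : Int)).toNat := by rw [hNn]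
          _ = (((s % N.toNat : Nat)) : Int).toNat := congrArg Int.toNat (PySem.Int.mod_natCast s N.toNat)
          _ = s % N.toNat := Int.toNat_natCast _
      have hcast : ((s : Int) + 1) = ((s + 1 : Nat) : Int) := by push_cast; ring
      rw [hmod, hcast, ih (s + 1) _ (by simp [hbs])]
      apply List.map_congr_left
      intro j hj
      have hjn : j < N.toNat := List.mem_range.mp hj
      have hjb : j < bs.length := by omega
      by_cases h : s % N.toNat = j
      · have hgd : (bs.modify (s % N.toNat) (fun b => b ++ [x])).getD j []
            = bs.getD j [] ++ [x] := by
          simp [List.getD_eq_getElem?_getD, h, List.getElem?_eq_getElem hjb]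
        rw [hgd]
        simp [spread, h, List.append_assoc]
      · have hgd : (bs.modify (s % N.toNat) (fun b => b ++ [x])).getD j []
            = bs.getD j [] := by
          simp [List.getD_eq_getElem?_getD, h]
        rw [hgd]
        simp [spread, h]

-- A's bucket j (the islice) equals `spread` from offset 0
theorem bucket_eq_spread (L : List Int) (N : Int) (hN : 0 < N) (j : Nat) (hj : j < N.toNat) :
    (PySem.List.slice? L (some (j : Int)) (some (PySem.List.len L)) N).getD []
      = spread N.toNat L 0 j := by
  have hn : 0 < N.toNat := by omega
  have hNn : N = ((N.toNat : Nat) : Int) := by omega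
  set n := N.toNat with hndef
  rw [hNn]
  simp only [PySem.List.slice?, PySem.List.sliceIndices, PySem.List.len]
  have hstep0 : ¬ ((n : Int) = 0) := by exact_mod_cast Nat.pos_iff_ne_zero.mp hn
  have hstepneg : ¬ ((n : Int) < 0) := by omega
  simp only [if_neg hstep0, if_neg hstepneg]
  have hj0 : ¬ ((j : Int) < 0) := by omega
  simp only [if_neg hj0]
  have hstop : ¬ ((L.length : Int) < 0) := by omega
  simp only [if_neg hstop, min_self]
  have hpos : (0 : Int) < (n : Int) := by exact_mod_cast hn
  simp only [if_pos hpos, Option.getD_some]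
  have hmod0 : (0 + j) % n = j := by simpa using Nat.mod_eq_of_lt hj
  by_cases hle : j ≤ L.length
  · have hmin : min ((j : Int)) ((L.length : Int)) = (j : Int) := by omega
    rw [hmin]
    by_cases hlt : (j : Int) < (L.length : Int)
    · rw [if_pos hlt]
      set m : Int := (L.length : Int) - (j : Int) + (n : Int) - 1 with hm
      have hdiv := Int.mul_ediv_add_emod m (n : Int)
      have hr1 := Int.emod_lt_of_pos m hpos
      have hr2 := Int.emod_nonneg m (by omega : ((n : Int)) ≠ 0)
      have hq0 : 0 ≤ m / (n : Int) := Int.ediv_nonneg (by omega) (by omega)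
      have hqq : (((m / (n : Int)).toNat : Nat) : Int) = m / (n : Int) := by omega
      have hmul : ((n * (m / (n : Int)).toNat : Nat) : Int) = (n : Int) * (m / (n : Int)) := by
        push_cast
        rw [hqq]
      have hcount : L.length ≤ j + n * (m / (n : Int)).toNat := by omega
      have hidx : ∀ k ∈ List.range (m / (n : Int)).toNat,
          (fun k : Nat => L[((j : Int) + (n : Int) * (k : Int)).toNat]?) k
            = (fun k : Nat => L[j + n * k]?) k := by
        intro k _
        have hnk : (0 : Int) ≤ (n : Int) * (k : Int) := by positivity
        have hnk2 : ((n * k : Nat) : Int) = (n : Int) * (k : Int) := by push_cast; ring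
        have e : ((j : Int) + (n : Int) * (k : Int)).toNat = j + n * k := by omega
        simp only [e]
      rw [List.filterMap_congr hidx]
      exact filterMap_stride_eq_spread n hn L 0 j _ j hj hmod0 hcount
    · rw [if_neg hlt]
      rw [← filterMap_stride_eq_spread n hn L 0 j 0 j hj hmod0 (by omega)]
      simp
  · have hmin : min ((j : Int)) ((L.length : Int)) = (L.length : Int) := by omega
    rw [hmin]
    rw [if_neg (by omega : ¬ ((L.length : Int) < (L.length : Int)))]
    rw [← filterMap_stride_eq_spread n hn L 0 j 0 j hj hmod0 (by omega)]
    simp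

theorem nList_eq (L : List Int) (N : Int) : nList L N = nList_alt L N := by
  by_cases hN : N ≤ 0
  · simp [nList, nList_alt, hN, PySem.List.pyRange_one_eq_nil hN]
  · have hNpos : 0 < N := by omega
    have hn : 0 < N.toNat := by omega
    have hA : nList L N
        = (List.range N.toNat).map (fun j => spread N.toNat L 0 j) := by
      unfold nList
      rw [PySem.List.foldl_append_singleton_eq_map, PySem.List.pyRange_zero, List.map_map]
      simp only [List.nil_append]
      apply List.map_congr_left
      intro j hj
      exact bucket_eq_spread L N hNpos j (List.mem_range.mp hj)
    have hB : nList_alt L N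
        = (List.range N.toNat).map (fun j => spread N.toNat L 0 j) := by
      unfold nList_alt
      rw [if_neg hN]
      rw [show (0 : Int) = ((0 : Nat) : Int) from rfl,
        distrib_inv N hNpos L 0 (List.replicate N.toNat []) (by simp)]
      apply List.map_congr_left
      intro j hj
      have hjn : j < N.toNat := List.mem_range.mp hj
      rw [List.getD_eq_getElem?_getD, List.getElem?_replicate, if_pos hjn]
      rfl
    rw [hA, hB]

-- ===== VERDICT (by name: the statement is the Claim_ definition above) =====
theorem nList_spec : Claim_equal_nList := by
  intro L N _
  unfold Spec_nList
  exact nList_eq L N
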